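-- pv_equiv track=rewrite | github.com/zarSou9/taxonomy-generator | taxonomy_generator/utils/prompting.py | join_items_english
-- ===== SOURCE A (Python) =====
-- def join_items_english(items: list[str]) -> str:
--     meta_str = ""
--     for i in range(len(items) - 1):
--         if i < len(items) - 2:
--             meta_str += items[i] + ", "
--         else:
--             meta_str += items[i] + " and "
--
--     return meta_str + items[-1]
-- ===== SOURCE B (Python) =====
-- def join_items_english(items: list[str]) -> str:
--     if len(items) <= 1:
--         return items[-1]
--     return ", ".join(items[:-1]) + " and " + items[-1]
-- ===== Notes on version B (the rewrite author's own statement) =====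
-- stated objective: idiomatic
-- what changed: Replaces the index-counting loop with its per-iteration position comparison by a single str.join over items[:-1] plus ' and ' and the last item, with a length<=1 short-circuit.
import Mathlib
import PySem

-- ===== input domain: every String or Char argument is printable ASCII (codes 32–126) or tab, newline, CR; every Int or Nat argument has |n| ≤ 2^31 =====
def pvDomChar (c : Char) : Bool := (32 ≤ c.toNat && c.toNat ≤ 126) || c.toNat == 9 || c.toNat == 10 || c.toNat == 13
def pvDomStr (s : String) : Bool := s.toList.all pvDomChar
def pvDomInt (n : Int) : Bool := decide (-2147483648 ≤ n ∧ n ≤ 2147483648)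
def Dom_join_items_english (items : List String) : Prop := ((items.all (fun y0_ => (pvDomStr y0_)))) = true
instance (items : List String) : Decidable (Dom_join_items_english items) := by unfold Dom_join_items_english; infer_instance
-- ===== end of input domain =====

-- B replaces A's index-counting loop (with its per-iteration position test) by a ", ".join over
-- items[:-1] plus " and " and the last item — idiomatic, same cost; both raise IndexError on [].

-- ===== PORT A =====
def join_items_english (items : List String) : String :=
  let meta_str :=
    (PySem.List.pyRange 0 ((items.length : Int) - 1) 1).foldl
      (fun s i =>
        if i < (items.length : Int) - 2 then
          s ++ PySem.List.pyGetD items i "" ++ ", "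
        else
          s ++ PySem.List.pyGetD items i "" ++ " and ") ""
  meta_str ++ PySem.List.pyGetD items (-1) ""

-- ===== PORT B =====
def join_items_english_alt (items : List String) : String :=
  if items.length ≤ 1 then
    PySem.List.pyGetD items (-1) ""
  else
    PySem.Str.join ", " (PySem.List.slice items none (some (-1))) ++ " and "
      ++ PySem.List.pyGetD items (-1) ""

-- ===== PRECONDITION & SPEC =====
-- Python A evaluates items[-1], an IndexError on the empty list; Pre_ excludes exactly that input.
def Pre_join_items_english (items : List String) : Prop := items ≠ []
instance (items : List String) : Decidable (Pre_join_items_english items) := by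
  unfold Pre_join_items_english; infer_instance

def pvWitness_join_items_english : List String := ["apples", "pears", "plums"]

def Spec_join_items_english (items : List String) (out : String) : Prop := out = join_items_english_alt items
instance (items : List String) (out : String) : Decidable (Spec_join_items_english items out) := by unfold Spec_join_items_english; infer_instance

-- ===== CLAIM (what is proved, stated in full; the proofs are below) =====
def Claim_equal_join_items_english : Prop := ∀ (items : List String), Dom_join_items_english items → Pre_join_items_english items → Spec_join_items_english items (join_items_english items)

-- ===== LEMMAS AND PROOFS =====

-- a fold over range(len zs) indexing into zs is a fold over zs
lemma foldl_range_getD (g : String → String → String) (zs : List String) :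
    ∀ init : String,
      (List.range zs.length).foldl (fun s k => g s (zs.getD k "")) init = zs.foldl g init := by
  induction zs with
  | nil => intro init; simp
  | cons z zs ih =>
      intro init
      simp only [List.length_cons, List.range_succ_eq_map, List.foldl_cons, List.foldl_map,
        List.getD_cons_zero, List.getD_cons_succ]
      exact ih (g init z)

-- ", ".join of zs ++ [y] as a comma-appending fold
lemma join_concat (zs : List String) (y : String) :
    ∀ init : String,
      zs.foldl (fun s z => s ++ z ++ ", ") init ++ y
        = init ++ PySem.Str.join ", " (zs ++ [y]) := by
  induction zs with
  | nil =>
      intro init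
      apply String.toList_inj.mp
      simp [PySem.Str.toList_join, PySem.Chars.join_singleton]
  | cons z zs ih =>
      intro init
      simp only [List.foldl_cons, List.cons_append]
      rw [ih (init ++ z ++ ", ")]
      apply String.toList_inj.mp
      cases zs with
      | nil =>
          simp [PySem.Str.toList_join, PySem.Chars.join_cons_cons, PySem.Chars.join_singleton]
      | cons w ws =>
          simp [PySem.Str.toList_join, PySem.Chars.join_cons_cons]

-- characterisation of A's accumulated meta_str for lists of length ≥ 2
lemma meta_eq (zs : List String) (y last : String) :
    (List.range (zs.length + 1)).foldl
        (fun (s : String) (k : Nat) =>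
          if (k : Int) < (zs.length : Int) then
            s ++ (zs ++ [y] ++ [last]).getD k "" ++ ", "
          else
            s ++ (zs ++ [y] ++ [last]).getD k "" ++ " and ") ""
      = PySem.Str.join ", " (zs ++ [y]) ++ " and " := by
  rw [List.range_succ, List.foldl_append]
  have h1 : (List.range zs.length).foldl
      (fun (s : String) (k : Nat) =>
        if (k : Int) < (zs.length : Int) then
          s ++ (zs ++ [y] ++ [last]).getD k "" ++ ", "
        else
          s ++ (zs ++ [y] ++ [last]).getD k "" ++ " and ") ""
      = (List.range zs.length).foldl (fun s k => s ++ zs.getD k "" ++ ", ") "" := by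
    apply PySem.List.foldl_congr_mem
    intro acc k hk
    rw [List.mem_range] at hk
    have hlt : (k : Int) < (zs.length : Int) := by exact_mod_cast hk
    rw [if_pos hlt]
    congr 2
    rw [List.append_assoc, List.getD_append _ _ _ _ hk]
  rw [h1, foldl_range_getD (fun s z => s ++ z ++ ", ") zs ""]
  have h2 : (zs ++ [y] ++ [last]).getD zs.length "" = y := by
    rw [List.append_assoc]; simp
  simp only [List.foldl_cons, List.foldl_nil]
  rw [if_neg (by omega), h2, join_concat zs y ""]
  rw [String.empty_append]

-- ===== VERDICT (by name: the statement is the Claim_ definition above) =====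
theorem join_items_english_spec : Claim_equal_join_items_english := by
  intro items _ hpre
  unfold Spec_join_items_english join_items_english join_items_english_alt
  rcases List.eq_nil_or_concat items with h | ⟨ys, last, rfl⟩
  · exact absurd h hpre
  rcases List.eq_nil_or_concat ys with h | ⟨zs, y, rfl⟩
  · subst h
    simp only [List.concat_eq_append, List.nil_append, List.length_cons, List.length_nil]
    norm_num
  · simp only [List.concat_eq_append]
    have hlen : (zs ++ [y] ++ [last]).length = zs.length + 2 := by simp
    rw [hlen]
    have hr : ((zs.length + 2 : Nat) : Int) - 1 = ((zs.length + 1 : Nat) : Int) := by push_cast; ring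
    rw [if_neg (by omega)]
    rw [hr, PySem.List.pyRange_zero_natCast, List.foldl_map]
    have hbody : ∀ (s : String) (k : Nat),
        (if (k : Int) < ((zs.length + 2 : Nat) : Int) - 2 then
            s ++ PySem.List.pyGetD (zs ++ [y] ++ [last]) (k : Int) "" ++ ", "
          else
            s ++ PySem.List.pyGetD (zs ++ [y] ++ [last]) (k : Int) "" ++ " and ")
        = (if (k : Int) < (zs.length : Int) then
            s ++ (zs ++ [y] ++ [last]).getD k "" ++ ", "
          else
            s ++ (zs ++ [y] ++ [last]).getD k "" ++ " and ") := by
      intro s k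
      have : ((zs.length + 2 : Nat) : Int) - 2 = (zs.length : Int) := by push_cast; ring
      rw [this, PySem.List.pyGetD_natCast]
    simp only [hbody]
    rw [meta_eq zs y last]
    rw [PySem.List.slice_to_neg_one]
    have hd : (zs ++ [y] ++ [last]).dropLast = zs ++ [y] := by
      rw [List.dropLast_concat]
    rw [hd, PySem.List.pyGetD_neg_one_append_singleton]
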